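-- pv_equiv track=rewrite | github.com/HeeJohn/coding | greedy/joystick.py | takeMinLR
-- ===== SOURCE A (Python) =====
-- def inBound(index, length) :
--     new = index % length
--
--     if new >= 0 : return new
--     return length + new
--
-- def takeMinLR(letters, index) :
--     mv = 1
--     length = len(letters)
--
--     while length != mv :
--         newP = inBound(index+mv, length)
--         newN = inBound(index-mv, length)
--         if  letters[newP] != 'A' :
--             return newP, mv
--         if letters[newN] != 'A' :
--             return newN, mv
--         mv+=1
--
--     return 0,0
-- ===== SOURCE B (Python) =====
-- def takeMinLR(letters, index):
--     length = len(letters)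
--     start = index % length
--     best = None  # (key, i) with key = (dist, priority)
--     for i in range(length):
--         if i == start:
--             continue
--         if letters[i] != 'A':
--             fd = (i - index) % length
--             bd = (index - i) % length
--             key = (min(fd, bd), 0 if fd <= bd else 1)
--             if best is None or key < best[0]:
--                 best = (key, i)
--     if best is None:
--         return 0, 0
--     return best[1], best[0][0]
-- ===== Notes on version B (the rewrite author's own statement) =====
-- stated objective: alternative
-- what changed: A's expanding-ring scan (probe index+mv and index-mv for mv = 1, 2, ... and return the first non-'A' hit, forward before backward) is replaced by a single left-to-right pass over all positions that keeps a running best under the key (circular distance, forward-before-backward priority).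
import Mathlib
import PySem

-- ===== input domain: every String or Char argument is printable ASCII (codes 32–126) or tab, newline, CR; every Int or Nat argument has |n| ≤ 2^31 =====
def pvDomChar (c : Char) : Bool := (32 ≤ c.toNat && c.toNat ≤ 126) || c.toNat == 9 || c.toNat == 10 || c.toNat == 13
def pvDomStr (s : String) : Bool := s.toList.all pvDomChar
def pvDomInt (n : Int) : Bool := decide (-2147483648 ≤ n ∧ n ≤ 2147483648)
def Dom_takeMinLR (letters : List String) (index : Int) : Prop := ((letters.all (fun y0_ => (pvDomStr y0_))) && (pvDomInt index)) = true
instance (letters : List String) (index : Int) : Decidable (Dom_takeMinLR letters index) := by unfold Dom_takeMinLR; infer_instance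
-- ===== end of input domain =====

-- B replaces A's expanding-ring scan (mv = 1, 2, … probing index±mv until the first hit)
-- by a single left-to-right pass over all positions keeping a running best by the key
-- (circular distance, forward-before-backward); objective: a simpler single-pass alternative.

-- ===== PORT A =====
def inBoundA (index length : Int) : Int :=
  let new := PySem.Int.mod index length
  if new ≥ 0 then new else length + new

-- fuel = len(letters) bounds Python's while loop exactly (mv runs 1 … length-1);
-- the fuel-out value is never reached on inputs satisfying Pre_.
def takeMinLRLoop (letters : List String) (index length : Int) : Nat → Int → Int × Int
  | 0, _ => (0, 0)
  | fuel + 1, mv =>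
    if length = mv then (0, 0)
    else
      let newP := inBoundA (index + mv) length
      let newN := inBoundA (index - mv) length
      if (PySem.List.pyGet? letters newP).getD "" ≠ "A" then (newP, mv)
      else if (PySem.List.pyGet? letters newN).getD "" ≠ "A" then (newN, mv)
      else takeMinLRLoop letters index length fuel (mv + 1)

def takeMinLR (letters : List String) (index : Int) : Int × Int :=
  takeMinLRLoop letters index (letters.length : Int) letters.length 1

-- ===== PORT B =====
def takeMinLR_alt (letters : List String) (index : Int) : Int × Int :=
  let length : Int := letters.length
  let start := PySem.Int.mod index length
  let best := (PySem.List.pyRange 0 length 1).foldl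
    (fun best i =>
      if i = start then best
      else if (PySem.List.pyGet? letters i).getD "" ≠ "A" then
        let fd := PySem.Int.mod (i - index) length
        let bd := PySem.Int.mod (index - i) length
        let key : Int × Int := (min fd bd, if fd ≤ bd then 0 else 1)
        match best with
        | none => some (key, i)
        | some (bk, bi) =>
          if key.1 < bk.1 ∨ (key.1 = bk.1 ∧ key.2 < bk.2) then some (key, i)
          else some (bk, bi)
      else best) none
  match best with
  | none => (0, 0)
  | some (k, i) => (i, k.1)

-- ===== PRECONDITION & SPEC =====
-- Pre_ excludes only the empty list, on which Python A raises ZeroDivisionError.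
def Pre_takeMinLR (letters : List String) (index : Int) : Prop := letters ≠ []
instance (letters : List String) (index : Int) : Decidable (Pre_takeMinLR letters index) := by
  unfold Pre_takeMinLR; infer_instance

def pvWitness_takeMinLR : List String × Int := (["A", "B"], 0)

def Spec_takeMinLR (letters : List String) (index : Int) (out : Int × Int) : Prop := out = takeMinLR_alt letters index
instance (letters : List String) (index : Int) (out : Int × Int) : Decidable (Spec_takeMinLR letters index out) := by unfold Spec_takeMinLR; infer_instance

-- ===== CLAIM (what is proved, stated in full; the proofs are below) =====
def Claim_equal_takeMinLR : Prop := ∀ (letters : List String) (index : Int), Dom_takeMinLR letters index → Pre_takeMinLR letters index → Spec_takeMinLR letters index (takeMinLR letters index)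

-- ===== LEMMAS AND PROOFS =====

-- letter at position i (port-level lookup)
def pvL (letters : List String) (i : Int) : String := (PySem.List.pyGet? letters i).getD ""
-- forward / backward circular distance from index to i, distance and priority
def pvFd (index n i : Int) : Int := (i - index) % n
def pvBd (index n i : Int) : Int := (index - i) % n
def pvD (index n i : Int) : Int := min (pvFd index n i) (pvBd index n i)
def pvPri (index n i : Int) : Int := if pvFd index n i ≤ pvBd index n i then 0 else 1
-- i is a candidate: in range, not the start position, letter ≠ "A"
def pvGood (letters : List String) (index n i : Int) : Prop :=
  0 ≤ i ∧ i < n ∧ i ≠ index % n ∧ pvL letters i ≠ "A"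
def pvKeyLe (index n i j : Int) : Prop :=
  pvD index n i < pvD index n j ∨ (pvD index n i = pvD index n j ∧ pvPri index n i ≤ pvPri index n j)
-- out is the answer: (0,0) if no candidate, else the key-minimal candidate with its distance
def pvIsAns (letters : List String) (index n : Int) (out : Int × Int) : Prop :=
  ((∀ i, ¬ pvGood letters index n i) ∧ out = (0, 0)) ∨
  (∃ i, pvGood letters index n i ∧ out = (i, pvD index n i) ∧
    ∀ j, pvGood letters index n j → pvKeyLe index n i j)

lemma pvL_def (letters : List String) (i : Int) :
    (PySem.List.pyGet? letters i).getD "" = pvL letters i := rfl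

lemma pvMod_bounds {n : Int} (a : Int) (hn : 0 < n) : 0 ≤ a % n ∧ a % n < n :=
  ⟨Int.emod_nonneg a (by omega), Int.emod_lt_of_pos a hn⟩

lemma pvFd_inj {index n i j : Int} (hn : 0 < n) (hi : 0 ≤ i) (hi' : i < n)
    (hj : 0 ≤ j) (hj' : j < n) (h : pvFd index n i = pvFd index n j) : i = j := by
  unfold pvFd at h
  have h1 : (i - j) % n = 0 := by
    have heq : (i - j) % n = ((i - index) - (j - index)) % n := by ring_nf
    rw [heq, Int.sub_emod, h, sub_self, Int.zero_emod]
  have hdvd : n ∣ (i - j) := Int.dvd_of_emod_eq_zero h1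
  have : i - j = 0 := Int.eq_zero_of_abs_lt_dvd hdvd (by rw [abs_lt]; omega)
  omega

lemma pvBd_inj {index n i j : Int} (hn : 0 < n) (hi : 0 ≤ i) (hi' : i < n)
    (hj : 0 ≤ j) (hj' : j < n) (h : pvBd index n i = pvBd index n j) : i = j := by
  unfold pvBd at h
  have h1 : (j - i) % n = 0 := by
    have heq : (j - i) % n = ((index - i) - (index - j)) % n := by ring_nf
    rw [heq, Int.sub_emod, h, sub_self, Int.zero_emod]
  have hdvd : n ∣ (j - i) := Int.dvd_of_emod_eq_zero h1
  have : j - i = 0 := Int.eq_zero_of_abs_lt_dvd hdvd (by rw [abs_lt]; omega)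
  omega

lemma pvPri_cases (index n i : Int) : pvPri index n i = 0 ∨ pvPri index n i = 1 := by
  unfold pvPri; split <;> simp

lemma pvPri_eq_zero {index n i : Int} :
    pvPri index n i = 0 ↔ pvFd index n i ≤ pvBd index n i := by
  unfold pvPri; split <;> simp_all

lemma pvKey_inj {index n i j : Int} (hn : 0 < n) (hi : 0 ≤ i) (hi' : i < n)
    (hj : 0 ≤ j) (hj' : j < n) (hd : pvD index n i = pvD index n j)
    (hp : pvPri index n i = pvPri index n j) : i = j := by
  unfold pvD at hd
  unfold pvPri at hp
  split_ifs at hp with h1 h2 h2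
  · rw [min_eq_left h1, min_eq_left h2] at hd
    exact pvFd_inj hn hi hi' hj hj' hd
  · exact absurd hp (by norm_num)
  · exact absurd hp (by norm_num)
  · rw [min_eq_right (not_le.mp h1).le, min_eq_right (not_le.mp h2).le] at hd
    exact pvBd_inj hn hi hi' hj hj' hd

lemma pvAns_uniq {letters : List String} {index n : Int} {o1 o2 : Int × Int} (hn : 0 < n)
    (h1 : pvIsAns letters index n o1) (h2 : pvIsAns letters index n o2) : o1 = o2 := by
  rcases h1 with ⟨he, h1⟩ | ⟨i, hgi, h1, hmi⟩
  · rcases h2 with ⟨_, h2⟩ | ⟨j, hgj, _, _⟩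
    · rw [h1, h2]
    · exact absurd hgj (he j)
  · rcases h2 with ⟨he, _⟩ | ⟨j, hgj, h2, hmj⟩
    · exact absurd hgi (he i)
    · have lij := hmi j hgj
      have lji := hmj i hgi
      have hd : pvD index n i = pvD index n j := by unfold pvKeyLe at lij lji; omega
      have hp : pvPri index n i = pvPri index n j := by unfold pvKeyLe at lij lji; omega
      have hij : i = j := pvKey_inj hn hgi.1 hgi.2.1 hgj.1 hgj.2.1 hd hp
      rw [h1, h2, hij]

lemma pvInBound_eq {n : Int} (a : Int) (hn : 0 < n) : inBoundA a n = a % n := by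
  unfold inBoundA
  rw [PySem.Int.mod_eq_emod_of_pos hn]
  simp [(pvMod_bounds a hn).1]

lemma pvFd_probe {index n mv : Int} (hn : 0 < n) (h0 : 0 ≤ mv) (h1 : mv < n) :
    pvFd index n ((index + mv) % n) = mv := by
  unfold pvFd
  rw [Int.sub_emod, Int.emod_emod_of_dvd _ dvd_rfl, ← Int.sub_emod]
  simpa using Int.emod_eq_of_lt h0 h1

lemma pvBd_probe {index n mv : Int} (hn : 0 < n) (h0 : 0 ≤ mv) (h1 : mv < n) :
    pvBd index n ((index - mv) % n) = mv := by
  unfold pvBd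
  rw [Int.sub_emod, Int.emod_emod_of_dvd _ dvd_rfl, ← Int.sub_emod]
  simpa using Int.emod_eq_of_lt h0 h1

lemma pvNotStart_of_fd_pos {index n i : Int} (hn : 0 < n) (hfd : 0 < pvFd index n i) :
    i ≠ index % n := by
  intro h
  have h0 : pvFd index n i = 0 := by
    unfold pvFd
    rw [h]
    exact Int.emod_eq_emod_iff_emod_sub_eq_zero.mp (Int.emod_emod_of_dvd index dvd_rfl)
  omega

lemma pvNotStart_of_bd_pos {index n i : Int} (hn : 0 < n) (hbd : 0 < pvBd index n i) :
    i ≠ index % n := by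
  intro h
  have h0 : pvBd index n i = 0 := by
    unfold pvBd
    rw [h]
    exact Int.emod_eq_emod_iff_emod_sub_eq_zero.mp (Int.emod_emod_of_dvd index dvd_rfl).symm
  omega

-- for a non-start in-range position, fd + bd = n and both are positive
lemma pvFd_add_bd {index n i : Int} (hn : 0 < n) (hi : 0 ≤ i) (hi' : i < n)
    (hne : i ≠ index % n) :
    pvFd index n i + pvBd index n i = n ∧ 0 < pvFd index n i ∧ 0 < pvBd index n i := by
  have hf := pvMod_bounds (i - index) hn
  have hb := pvMod_bounds (index - i) hn
  have hfd0 : (i - index) % n ≠ 0 := by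
    intro h
    apply hne
    rw [← Int.emod_eq_of_lt hi hi']
    exact Int.emod_eq_emod_iff_emod_sub_eq_zero.mpr h
  have hbd0 : (index - i) % n ≠ 0 := by
    intro h
    apply hne
    rw [← Int.emod_eq_of_lt hi hi']
    exact (Int.emod_eq_emod_iff_emod_sub_eq_zero.mpr h).symm
  have hsum : ((i - index) % n + (index - i) % n) % n = 0 := by
    rw [← Int.add_emod]
    have h0 : i - index + (index - i) = 0 := by ring
    rw [h0, Int.zero_emod]
  obtain ⟨k, hk⟩ := Int.dvd_of_emod_eq_zero hsum
  have hkpos : 0 < k := by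
    by_contra hk0
    have hk0' : k ≤ 0 := not_lt.mp hk0
    have hnk : n * k ≤ 0 := mul_nonpos_iff.mpr (Or.inl ⟨hn.le, hk0'⟩)
    omega
  have hklt : k < 2 := by
    have h2 : n * k < n * 2 := by omega
    exact lt_of_mul_lt_mul_left h2 hn.le
  have hk1 : k = 1 := by omega
  subst hk1
  unfold pvFd pvBd
  omega

-- d i < n always (for good i)
lemma pvD_lt {letters : List String} {index n i : Int} (hn : 0 < n)
    (hg : pvGood letters index n i) : 0 < pvD index n i ∧ 2 * pvD index n i ≤ n := by
  have h := pvFd_add_bd hn hg.1 hg.2.1 hg.2.2.1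
  unfold pvD
  rcases min_cases (pvFd index n i) (pvBd index n i) with ⟨h1, h2⟩ | ⟨h1, h2⟩ <;> omega

lemma pvKeyLe_refl (index n i : Int) : pvKeyLe index n i i := Or.inr ⟨rfl, le_rfl⟩

-- ===== A SIDE =====
lemma pvLoopA_ans (letters : List String) (index : Int) :
    ∀ (fuel : Nat) (mv : Int), 0 < (letters.length : Int) → 1 ≤ mv → mv ≤ (letters.length : Int) →
    fuel = ((letters.length : Int) - mv).toNat + 1 →
    (∀ i, pvGood letters index (letters.length : Int) i → mv ≤ pvD index (letters.length : Int) i) →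
    pvIsAns letters index (letters.length : Int) (takeMinLRLoop letters index (letters.length : Int) fuel mv) := by
  intro fuel
  induction fuel with
  | zero => intro mv hn h1 h2 hf hinv; omega
  | succ f ih =>
    intro mv hn h1 h2 hf hinv
    by_cases hstop : (letters.length : Int) = mv
    · simp only [takeMinLRLoop, if_pos hstop]
      refine Or.inl ⟨fun i hg => ?_, rfl⟩
      have hd := pvD_lt hn hg
      have := hinv i hg
      omega
    · have hmvlt : mv < (letters.length : Int) := by omega
      simp only [takeMinLRLoop, if_neg hstop, pvInBound_eq _ hn, pvL_def]
      set n : Int := (letters.length : Int) with hndef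
      have hp := pvMod_bounds (index + mv) hn
      have hq := pvMod_bounds (index - mv) hn
      have hfdp : pvFd index n ((index + mv) % n) = mv := pvFd_probe hn (by omega) hmvlt
      have hbdq : pvBd index n ((index - mv) % n) = mv := pvBd_probe hn (by omega) hmvlt
      have hpstart : (index + mv) % n ≠ index % n := pvNotStart_of_fd_pos hn (by omega)
      have hqstart : (index - mv) % n ≠ index % n := pvNotStart_of_bd_pos hn (by omega)
      have hpsum := pvFd_add_bd hn hp.1 hp.2 hpstart
      have hqsum := pvFd_add_bd hn hq.1 hq.2 hqstart
      have hbdp : pvBd index n ((index + mv) % n) = n - mv := by omega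
      have hfdq : pvFd index n ((index - mv) % n) = n - mv := by omega
      split_ifs with hP hN
      · -- hit forward at p
        have hgp : pvGood letters index n ((index + mv) % n) := ⟨hp.1, hp.2, hpstart, hP⟩
        have hmvle : 2 * mv ≤ n := by
          have h1 := hinv _ hgp
          have h2 : pvD index n ((index + mv) % n) ≤ n - mv := by
            unfold pvD; rw [hfdp, hbdp]; exact min_le_right _ _
          omega
        have hdp : pvD index n ((index + mv) % n) = mv := by
          unfold pvD; rw [hfdp, hbdp, min_eq_left (by omega)]
        have hout : ((index + mv) % n, mv) = ((index + mv) % n, pvD index n ((index + mv) % n)) := by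
          rw [hdp]
        have hprip : pvPri index n ((index + mv) % n) = 0 := by
          rw [pvPri_eq_zero, hfdp, hbdp]; omega
        refine Or.inr ⟨(index + mv) % n, hgp, hout, fun j hgj => ?_⟩
        have hj := hinv j hgj
        rcases pvPri_cases index n j with hpj | hpj <;> unfold pvKeyLe <;> omega
      · -- forward is 'A', hit backward at q
        have hgq : pvGood letters index n ((index - mv) % n) := ⟨hq.1, hq.2, hqstart, hN⟩
        have hmvle : 2 * mv ≤ n := by
          have h1 := hinv _ hgq
          have h2 : pvD index n ((index - mv) % n) ≤ n - mv := by
            unfold pvD; rw [hfdq, hbdq]; exact min_le_left _ _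
          omega
        have hmvne : 2 * mv ≠ n := by
          intro h2mv
          have : (index - mv) % n = (index + mv) % n :=
            pvFd_inj (index := index) hn hq.1 hq.2 hp.1 hp.2 (by omega)
          rw [this] at hN
          simp at hP hN
          exact hN (hP.symm ▸ rfl) |>.elim
        have hdq : pvD index n ((index - mv) % n) = mv := by
          unfold pvD; rw [hfdq, hbdq, min_eq_right (by omega)]
        have hpriq : pvPri index n ((index - mv) % n) = 1 := by
          unfold pvPri; rw [hfdq, hbdq]; rw [if_neg (by omega)]
        have hout : ((index - mv) % n, mv) = ((index - mv) % n, pvD index n ((index - mv) % n)) := by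
          rw [hdq]
        refine Or.inr ⟨(index - mv) % n, hgq, hout, fun j hgj => ?_⟩
        have hj := hinv j hgj
        rcases pvPri_cases index n j with hpj | hpj
        · -- priority-0 candidate at distance mv would be p, which is 'A'
          by_cases hdj : pvD index n j = mv
          · exfalso
            have hfdj : pvFd index n j = mv := by
              have := pvPri_eq_zero.mp hpj
              unfold pvD at hdj
              rw [min_eq_left this] at hdj
              exact hdj
            have : j = (index + mv) % n :=
              pvFd_inj (index := index) hn hgj.1 hgj.2.1 hp.1 hp.2 (by omega)
            rw [this] at hgj
            simp at hP
            exact hgj.2.2.2 (hP ▸ rfl)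
          · unfold pvKeyLe; omega
        · unfold pvKeyLe; omega
      · -- both 'A': step
        have hfnext : f = (n - (mv + 1)).toNat + 1 := by omega
        refine ih (mv + 1) hn (by omega) (by omega) hfnext (fun i hgi => ?_)
        have hi := hinv i hgi
        by_cases hdi : pvD index n i = mv
        · exfalso
          have hsum := pvFd_add_bd hn hgi.1 hgi.2.1 hgi.2.2.1
          unfold pvD at hdi
          rcases min_cases (pvFd index n i) (pvBd index n i) with ⟨hx, _⟩ | ⟨hx, _⟩
          · have : i = (index + mv) % n :=
              pvFd_inj (index := index) hn hgi.1 hgi.2.1 hp.1 hp.2 (by omega)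
            rw [this] at hgi
            simp at hP
            exact hgi.2.2.2 (hP ▸ rfl)
          · have : i = (index - mv) % n :=
              pvBd_inj (index := index) hn hgi.1 hgi.2.1 hq.1 hq.2 (by omega)
            rw [this] at hgi
            simp at hN
            exact hgi.2.2.2 (hN ▸ rfl)
        · omega

lemma pvA_ans (letters : List String) (index : Int) (hne : letters ≠ []) :
    pvIsAns letters index (letters.length : Int) (takeMinLR letters index) := by
  have hn : 0 < (letters.length : Int) := by
    have : letters.length ≠ 0 := by simpa using hne
    omega
  unfold takeMinLR
  have hf : letters.length = ((letters.length : Int) - 1).toNat + 1 := by omega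
  refine hf ▸ pvLoopA_ans letters index _ 1 hn le_rfl (by omega) (by omega) (fun i hg => ?_)
  exact (pvD_lt hn hg).1

-- ===== B SIDE =====
-- the fold step of B's single pass, named for the proofs (defeq to the lambda in the port)
def pvStepB (letters : List String) (index length start : Int)
    (best : Option ((Int × Int) × Int)) (i : Int) : Option ((Int × Int) × Int) :=
  if i = start then best
  else if (PySem.List.pyGet? letters i).getD "" ≠ "A" then
    let fd := PySem.Int.mod (i - index) length
    let bd := PySem.Int.mod (index - i) length
    let key : Int × Int := (min fd bd, if fd ≤ bd then 0 else 1)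
    match best with
    | none => some (key, i)
    | some (bk, bi) =>
      if key.1 < bk.1 ∨ (key.1 = bk.1 ∧ key.2 < bk.2) then some (key, i)
      else some (bk, bi)
  else best

lemma pvAltB_eq (letters : List String) (index : Int) :
    takeMinLR_alt letters index =
      (match (PySem.List.pyRange 0 (letters.length : Int) 1).foldl
          (pvStepB letters index (letters.length : Int) (PySem.Int.mod index (letters.length : Int))) none with
        | none => ((0 : Int), (0 : Int))
        | some (k, i) => (i, k.1)) := rfl

-- acc is the running best over the positions satisfying P
def pvBest (letters : List String) (index n : Int) (P : Int → Prop)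
    (acc : Option ((Int × Int) × Int)) : Prop :=
  (acc = none ∧ ∀ i, P i → ¬ pvGood letters index n i) ∨
  (∃ i, pvGood letters index n i ∧ P i ∧ acc = some ((pvD index n i, pvPri index n i), i) ∧
    ∀ j, P j → pvGood letters index n j → pvKeyLe index n i j)

lemma pvBest_congr {letters : List String} {index n : Int} {P Q : Int → Prop}
    {acc : Option ((Int × Int) × Int)} (h : pvBest letters index n P acc)
    (hpq : ∀ i, P i ↔ Q i) : pvBest letters index n Q acc := by
  rcases h with ⟨ha, hb⟩ | ⟨i, hg, hp, ha, hm⟩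
  · exact Or.inl ⟨ha, fun i hi => hb i ((hpq i).mpr hi)⟩
  · exact Or.inr ⟨i, hg, (hpq i).mp hp, ha, fun j hj => hm j ((hpq j).mpr hj)⟩

lemma pvBest_ext_notgood {letters : List String} {index n x : Int} {P : Int → Prop}
    {acc : Option ((Int × Int) × Int)} (hx : ¬ pvGood letters index n x)
    (h : pvBest letters index n P acc) :
    pvBest letters index n (fun i => P i ∨ i = x) acc := by
  rcases h with ⟨ha, hb⟩ | ⟨i, hg, hp, ha, hm⟩
  · refine Or.inl ⟨ha, fun i hi => ?_⟩
    rcases hi with hi | rfl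
    · exact hb i hi
    · exact hx
  · refine Or.inr ⟨i, hg, Or.inl hp, ha, fun j hj hgj => ?_⟩
    rcases hj with hj | rfl
    · exact hm j hj hgj
    · exact absurd hgj hx

lemma pvStepB_best {letters : List String} {index x : Int} {P : Int → Prop}
    {acc : Option ((Int × Int) × Int)} (hn : 0 < (letters.length : Int))
    (hx0 : 0 ≤ x) (hxn : x < (letters.length : Int))
    (h : pvBest letters index (letters.length : Int) P acc) :
    pvBest letters index (letters.length : Int) (fun i => P i ∨ i = x)
      (pvStepB letters index (letters.length : Int) (PySem.Int.mod index (letters.length : Int)) acc x) := by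
  set n : Int := (letters.length : Int) with hndef
  unfold pvStepB
  rw [PySem.Int.mod_eq_emod_of_pos hn, PySem.Int.mod_eq_emod_of_pos hn,
    PySem.Int.mod_eq_emod_of_pos hn, pvL_def]
  by_cases hs : x = index % n
  · rw [if_pos hs]
    exact pvBest_ext_notgood (fun hg => hg.2.2.1 hs) h
  · rw [if_neg hs]
    by_cases hA : pvL letters x ≠ "A"
    · rw [if_pos hA]
      have hgx : pvGood letters index n x := ⟨hx0, hxn, hs, hA⟩
      rcases h with ⟨ha, hb⟩ | ⟨i, hg, hp, ha, hm⟩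
      · rw [ha]
        refine Or.inr ⟨x, hgx, Or.inr rfl, rfl, fun j hj hgj => ?_⟩
        rcases hj with hj | rfl
        · exact absurd hgj (hb j hj)
        · exact pvKeyLe_refl index n j
      · rw [ha]
        show pvBest letters index n (fun i => P i ∨ i = x)
          (if pvD index n x < pvD index n i ∨
              (pvD index n x = pvD index n i ∧ pvPri index n x < pvPri index n i) then
            some ((pvD index n x, pvPri index n x), x)
          else some ((pvD index n i, pvPri index n i), i))
        by_cases hlt : pvD index n x < pvD index n i ∨
            (pvD index n x = pvD index n i ∧ pvPri index n x < pvPri index n i)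
        · rw [if_pos hlt]
          refine Or.inr ⟨x, hgx, Or.inr rfl, rfl, fun j hj hgj => ?_⟩
          rcases hj with hj | rfl
          · have := hm j hj hgj
            unfold pvKeyLe at this ⊢; omega
          · exact pvKeyLe_refl index n j
        · rw [if_neg hlt]
          refine Or.inr ⟨i, hg, Or.inl hp, rfl, fun j hj hgj => ?_⟩
          rcases hj with hj | rfl
          · exact hm j hj hgj
          · unfold pvKeyLe; omega
    · rw [if_neg hA]
      exact pvBest_ext_notgood (fun hg => hg.2.2.2 (not_not.mp hA)) h

lemma pvFoldB_best {letters : List String} {index : Int} (hn : 0 < (letters.length : Int)) :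
    ∀ (l : List Int) (P : Int → Prop) (acc : Option ((Int × Int) × Int)),
    (∀ x ∈ l, 0 ≤ x ∧ x < (letters.length : Int)) →
    pvBest letters index (letters.length : Int) P acc →
    pvBest letters index (letters.length : Int) (fun i => P i ∨ i ∈ l)
      (l.foldl (pvStepB letters index (letters.length : Int)
        (PySem.Int.mod index (letters.length : Int))) acc) := by
  intro l
  induction l with
  | nil =>
    intro P acc _ h
    exact pvBest_congr h (by simp)
  | cons x l ihl =>
    intro P acc hbnd h
    have hstep := pvStepB_best hn (hbnd x (by simp)).1 (hbnd x (by simp)).2 h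
    have := ihl (fun i => P i ∨ i = x) _ (fun y hy => hbnd y (by simp [hy])) hstep
    refine pvBest_congr this (fun i => ?_)
    simp [List.mem_cons]
    tauto

lemma pvB_ans (letters : List String) (index : Int) (hne : letters ≠ []) :
    pvIsAns letters index (letters.length : Int) (takeMinLR_alt letters index) := by
  have hn : 0 < (letters.length : Int) := by
    have : letters.length ≠ 0 := by simpa using hne
    omega
  rw [pvAltB_eq]
  have hbase : pvBest letters index (letters.length : Int) (fun _ => False) none :=
    Or.inl ⟨rfl, fun i hi => hi.elim⟩
  have hfold := pvFoldB_best hn (PySem.List.pyRange 0 (letters.length : Int) 1)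
    (fun _ => False) none
    (fun x hx => by rw [PySem.List.mem_pyRange_one] at hx; exact ⟨hx.1, hx.2⟩) hbase
  rcases hfold with ⟨ha, hb⟩ | ⟨i, hg, _, ha, hm⟩
  · rw [ha]
    refine Or.inl ⟨fun i hgi => ?_, rfl⟩
    refine hb i (Or.inr ?_) hgi
    rw [PySem.List.mem_pyRange_one]
    exact ⟨hgi.1, hgi.2.1⟩
  · rw [ha]
    refine Or.inr ⟨i, hg, rfl, fun j hgj => ?_⟩
    refine hm j (Or.inr ?_) hgj
    rw [PySem.List.mem_pyRange_one]
    exact ⟨hgj.1, hgj.2.1⟩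

-- ===== VERDICT (by name: the statement is the Claim_ definition above) =====
theorem takeMinLR_spec : Claim_equal_takeMinLR := by
  intro letters index _ hpre
  have hn : 0 < (letters.length : Int) := by
    have : letters.length ≠ 0 := by simpa using hpre
    omega
  exact pvAns_uniq hn (pvA_ans letters index hpre) (pvB_ans letters index hpre)
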